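-- pv_equiv track=rewrite | github.com/Gwenn01/PYTHON-CODING-PART2 | NumberOfBits.py | convert
-- ===== SOURCE A (Python) =====
-- def convert(n):
--     res = ""
--     while n != 0:
--         if n % 2 == 0:
--             res += '0'
--         else:
--              res += '1'
--         n //= 2
--     return res
-- ===== SOURCE B (Python) =====
-- def convert(n):
--     # LSB-first binary string via the built-in bin() instead of a digit loop.
--     if n == 0:
--         return ""
--     return bin(n)[2:][::-1]
-- ===== Notes on version B (the rewrite author's own statement) =====
-- stated objective: idiomatic
-- what changed: Replaces the repeated %2 / //=2 digit-extraction loop with a single built-in bin() conversion, prefix strip and string reversal.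
import Mathlib
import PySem

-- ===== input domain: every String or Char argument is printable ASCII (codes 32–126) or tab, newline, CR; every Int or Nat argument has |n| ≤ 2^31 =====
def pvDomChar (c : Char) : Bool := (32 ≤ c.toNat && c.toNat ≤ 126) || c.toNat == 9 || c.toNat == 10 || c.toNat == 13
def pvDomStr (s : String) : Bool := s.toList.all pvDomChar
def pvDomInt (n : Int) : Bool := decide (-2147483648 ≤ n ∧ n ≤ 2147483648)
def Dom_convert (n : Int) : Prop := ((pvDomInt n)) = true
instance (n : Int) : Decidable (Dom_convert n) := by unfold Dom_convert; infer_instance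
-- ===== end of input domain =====

-- B replaces A's %2 / //=2 digit loop with one library binary conversion plus a reversal (idiomatic).
-- For n < 0 Python A never terminates (the loop variable stays at -1), so Pre_ restricts to 0 ≤ n.

-- ===== PORT A =====
-- Python's `while n != 0` loop; for n < 0 the Python loop diverges (outside Pre_),
-- so the port guards the recursion with 0 < n instead of n ≠ 0.
def convertLoop (n : Int) (res : String) : String :=
  if 0 < n then
    convertLoop (PySem.Int.floordiv n 2) (res ++ (if PySem.Int.mod n 2 = 0 then "0" else "1"))
  else res
termination_by n.toNat
decreasing_by
  simp [PySem.Int.floordiv, Int.fdiv_eq_ediv]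
  omega

def convert (n : Int) : String := convertLoop n ""

-- ===== PORT B =====
-- bin(n)[2:] ported as the MSB-first binary digit characters (Nat.digits is LSB-first, hence the
-- .reverse), then [::-1] is a second .reverse.
def convert_alt (n : Int) : String :=
  if n = 0 then ""
  else
    String.ofList (((Nat.digits 2 n.toNat).map (fun d => if d = 0 then '0' else '1')).reverse).reverse

-- ===== PRECONDITION & SPEC =====
-- Pre_ excludes n < 0, on which Python A loops forever (never returns).
def Pre_convert (n : Int) : Prop := 0 ≤ n
instance (n : Int) : Decidable (Pre_convert n) := by unfold Pre_convert; infer_instance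
def pvWitness_convert : Int := (6)

def Spec_convert (n : Int) (out : String) : Prop := out = convert_alt n
instance (n : Int) (out : String) : Decidable (Spec_convert n out) := by unfold Spec_convert; infer_instance

-- ===== CLAIM (what is proved, stated in full; the proofs are below) =====
def Claim_equal_convert : Prop := ∀ (n : Int), Dom_convert n → Pre_convert n → Spec_convert n (convert n)

-- ===== LEMMAS AND PROOFS =====

lemma convertLoop_digits (k : Nat) (res : List Char) :
    convertLoop (k : Int) (String.ofList res) =
      String.ofList (res ++ (Nat.digits 2 k).map (fun d => if d = 0 then '0' else '1')) := by
  induction k using Nat.strong_induction_on generalizing res with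
  | _ k ih =>
    rw [convertLoop.eq_def]
    by_cases hk : 0 < (k : Int)
    · have hk' : 0 < k := by exact_mod_cast hk
      have hfd : PySem.Int.floordiv (k : Int) 2 = ((k / 2 : Nat) : Int) := by
        simp [PySem.Int.floordiv, Int.fdiv_eq_ediv]
      have hmod : PySem.Int.mod (k : Int) 2 = ((k % 2 : Nat) : Int) := by
        simp [PySem.Int.mod, Int.fmod_eq_emod]
      have happ : (String.ofList res ++ (if PySem.Int.mod (k : Int) 2 = 0 then "0" else "1")) =
          String.ofList (res ++ [if k % 2 = 0 then '0' else '1']) := by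
        rw [hmod]
        by_cases h2 : k % 2 = 0
        · rw [if_pos (by exact_mod_cast h2 : ((k % 2 : Nat) : Int) = 0), if_pos h2]; simp
        · rw [if_neg (by exact_mod_cast h2 : ¬ ((k % 2 : Nat) : Int) = 0), if_neg h2]; simp
      rw [if_pos hk, happ, hfd, ih (k / 2) (by omega)]
      rw [Nat.digits_def' (by norm_num : 1 < 2) hk']
      simp
    · have hk0 : k = 0 := by omega
      rw [if_neg hk]
      simp [hk0]

-- ===== VERDICT (by name: the statement is the Claim_ definition above) =====
theorem convert_spec : Claim_equal_convert := by
  intro n _ hpre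
  obtain ⟨k, rfl⟩ := Int.eq_ofNat_of_zero_le hpre
  show convert (k : Int) = convert_alt (k : Int)
  by_cases hk0 : k = 0
  · subst hk0
    show convert (0 : Int) = convert_alt (0 : Int)
    rw [convert, convertLoop.eq_def]
    norm_num [convert_alt]
  · have := convertLoop_digits k []
    simp only [convert]
    rw [show ("" : String) = String.ofList [] by simp, this]
    have hk : ¬ ((k : Int) = 0) := by exact_mod_cast hk0
    rw [convert_alt, if_neg hk]
    simp
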